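-- pv_equiv track=rewrite | github.com/kulraghav/CodePractice | practice.py | get_right_span
-- ===== SOURCE A (Python) =====
-- def get_right_span(h, B):
--     if not B:
--         return 0
--
--     begin = 0
--     end = len(B)-1
--
--     """
--         find first index i such that A[i] < h
--     """
--     while begin < end:
--         mid = (begin + end)//2
--         if B[mid] < h:
--             end = mid -1
--         else:
--             begin = mid + 1
--
--     if B[begin] < h:
--         first_index = begin
--     else:
--         first_index = begin + 1
--
--     span = first_index
--
--     return span
-- ===== SOURCE B (Python) =====
-- def _descend(flags, lo, hi):
--     if lo >= hi:
--         return lo if flags[lo] else lo + 1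
--     mid = (lo + hi) // 2
--     if flags[mid]:
--         return _descend(flags, lo, mid - 1)
--     return _descend(flags, mid + 1, hi)
--
-- def get_right_span(h, B):
--     if not B:
--         return 0
--     flags = [x < h for x in B]
--     return _descend(flags, 0, len(flags) - 1)
-- ===== Notes on version B (the rewrite author's own statement) =====
-- stated objective: alternative
-- what changed: B first precomputes, in one pass, a boolean list flags = [x < h for x in B], then descends that boolean list with a recursive helper whose base case performs A's post-loop fix-up; A instead runs an iterative while-loop over the raw integer list with a separate fix-up afterwards.
import Mathlib
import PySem

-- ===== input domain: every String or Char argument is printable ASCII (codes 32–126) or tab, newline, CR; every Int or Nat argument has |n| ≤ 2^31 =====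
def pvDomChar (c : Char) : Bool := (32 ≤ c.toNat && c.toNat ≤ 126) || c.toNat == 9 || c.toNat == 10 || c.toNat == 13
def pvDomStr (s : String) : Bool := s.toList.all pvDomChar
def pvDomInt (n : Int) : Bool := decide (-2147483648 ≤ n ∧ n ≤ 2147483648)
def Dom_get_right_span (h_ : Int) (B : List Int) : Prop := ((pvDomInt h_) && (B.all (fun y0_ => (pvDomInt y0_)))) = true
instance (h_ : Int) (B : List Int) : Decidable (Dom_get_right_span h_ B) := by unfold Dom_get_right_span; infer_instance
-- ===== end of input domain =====

-- B precomputes a boolean comparison list in one pass and descends it recursively,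
-- folding A's post-loop fix-up into the base case (objective: alternative).

-- ===== PORT A =====
-- the while-loop of A: returns the value of `begin` when the loop exits
-- (indices reached from (0, len-1) are always in range, so the default of pyGetD is never used)
def pvLoopA (h_ : Int) (B : List Int) (begin_ end_ : Int) : Int :=
  if begin_ < end_ then
    let mid := PySem.Int.floordiv (begin_ + end_) 2
    if PySem.List.pyGetD B mid 0 < h_ then pvLoopA h_ B begin_ (mid - 1)
    else pvLoopA h_ B (mid + 1) end_
  else begin_
termination_by (end_ - begin_).toNat
decreasing_by
  all_goals
    have hb := PySem.Int.floordiv_two_mid_bounds (lo := begin_) (hi := end_) (by omega)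
    omega

def get_right_span (h_ : Int) (B : List Int) : Int :=
  if B = [] then 0
  else
    let begin_ := pvLoopA h_ B 0 ((B.length : Int) - 1)
    if PySem.List.pyGetD B begin_ 0 < h_ then begin_ else begin_ + 1

-- ===== PORT B =====
-- recursive helper of Source B: walks the precomputed boolean list, fix-up in the base case
def pvDescend (flags : List Bool) (lo hi : Int) : Int :=
  if lo ≥ hi then
    if PySem.List.pyGetD flags lo false then lo else lo + 1
  else
    let mid := PySem.Int.floordiv (lo + hi) 2
    if PySem.List.pyGetD flags mid false then pvDescend flags lo (mid - 1)
    else pvDescend flags (mid + 1) hi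
termination_by (hi - lo).toNat
decreasing_by
  all_goals
    have hb := PySem.Int.floordiv_two_mid_bounds (lo := lo) (hi := hi) (by omega)
    omega

def get_right_span_alt (h_ : Int) (B : List Int) : Int :=
  if B = [] then 0
  else
    let flags := B.map (fun x => decide (x < h_))
    pvDescend flags 0 ((flags.length : Int) - 1)

-- ===== PRECONDITION & SPEC =====
def Spec_get_right_span (h_ : Int) (B : List Int) (out : Int) : Prop := out = get_right_span_alt h_ B
instance (h_ : Int) (B : List Int) (out : Int) : Decidable (Spec_get_right_span h_ B out) := by unfold Spec_get_right_span; infer_instance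

-- ===== CLAIM =====
def Claim_equal_get_right_span : Prop := ∀ (h_ : Int) (B : List Int), Dom_get_right_span h_ B → Spec_get_right_span h_ B (get_right_span h_ B)

-- ===== LEMMAS AND PROOFS =====
lemma flag_at (h_ : Int) (B : List Int) (i : Int) (h0 : 0 ≤ i) (h1 : i < (B.length : Int)) :
    PySem.List.pyGetD (B.map (fun x => decide (x < h_))) i false
      = decide (PySem.List.pyGetD B i 0 < h_) := by
  have h1' : i < ((B.map (fun x => decide (x < h_))).length : Int) := by
    simpa using h1
  simp [PySem.List.pyGetD, PySem.List.pyGet?_eq_some_getElem _ h0 h1',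
        PySem.List.pyGet?_eq_some_getElem _ h0 h1]

lemma loop_fixup_eq_descend (h_ : Int) (B : List Int) (b e : Int) :
    0 ≤ b → b < (B.length : Int) → e < (B.length : Int) →
    (if PySem.List.pyGetD B (pvLoopA h_ B b e) 0 < h_ then pvLoopA h_ B b e
     else pvLoopA h_ B b e + 1) = pvDescend (B.map (fun x => decide (x < h_))) b e := by
  fun_induction pvLoopA h_ B b e with
  | case1 b e hlt mid hc ih =>
      intro hb0 hb1 he1
      have hmd : mid = (b + e) / 2 := PySem.Int.floordiv_eq_ediv_of_pos (by norm_num)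
      rw [ih hb0 hb1 (by omega)]
      conv_rhs => rw [pvDescend]
      rw [if_neg (show ¬ b ≥ e by omega)]
      simp only [show PySem.Int.floordiv (b + e) 2 = mid from rfl]
      rw [flag_at h_ B mid (by omega) (by omega)]
      simp [hc]
  | case2 b e hlt mid hc ih =>
      intro hb0 hb1 he1
      have hmd : mid = (b + e) / 2 := PySem.Int.floordiv_eq_ediv_of_pos (by norm_num)
      rw [ih (by omega) (by omega) he1]
      conv_rhs => rw [pvDescend]
      rw [if_neg (show ¬ b ≥ e by omega)]
      simp only [show PySem.Int.floordiv (b + e) 2 = mid from rfl]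
      rw [flag_at h_ B mid (by omega) (by omega)]
      simp [hc]
  | case3 b e hge =>
      intro hb0 hb1 he1
      rw [pvDescend, if_pos (show b ≥ e by omega),
          flag_at h_ B b hb0 hb1]
      by_cases hc : PySem.List.pyGetD B b 0 < h_ <;> simp [hc]

-- ===== VERDICT =====
theorem get_right_span_spec : Claim_equal_get_right_span := by
  intro h_ B _
  unfold Spec_get_right_span get_right_span get_right_span_alt
  by_cases hB : B = []
  · simp [hB]
  · have hlen : 0 < (B.length : Int) := by
      have : B.length ≠ 0 := fun h => hB (List.length_eq_zero_iff.mp h)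
      omega
    simp only [hB, ite_false, List.length_map]
    exact loop_fixup_eq_descend h_ B 0 ((B.length : Int) - 1) le_rfl hlen (by omega)
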